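-- pv_equiv track=rewrite | github.com/atoutziaridis/QuantumRerank | quantum_rerank/search/optimization.py | _generate_recommended_actions
-- ===== SOURCE A (Python) =====
-- from typing import Dict, List, Optional, Any, Tuple
--
-- def _generate_recommended_actions(opportunities: List[Dict[str, Any]]) -> List[str]:
--     """Generate prioritized list of recommended actions."""
--     # Sort opportunities by priority
--     priority_order = {"high": 3, "medium": 2, "low": 1}
--     sorted_opportunities = sorted(
--         opportunities,
--         key=lambda x: priority_order.get(x.get("priority", "low"), 1),
--         reverse=True
--     )
--
--     # Generate action list
--     actions = []
--     for opp in sorted_opportunities[:5]:  # Top 5 opportunities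
--         actions.append(f"[{opp.get('priority', 'medium').upper()}] {opp.get('description', 'Unknown action')}")
--
--     return actions
-- ===== SOURCE B (Python) =====
-- from typing import Dict, List, Optional, Any, Tuple
--
-- def _generate_recommended_actions(opportunities: List[Dict[str, Any]]) -> List[str]:
--     """Generate prioritized list of recommended actions (single-pass bucket version)."""
--     high, medium, low = [], [], []
--     for opp in opportunities:
--         p = opp.get("priority")
--         if p == "high":
--             high.append(opp)
--         elif p == "medium":
--             medium.append(opp)
--         else:
--             low.append(opp)
--     return [
--         f"[{opp.get('priority', 'medium').upper()}] {opp.get('description', 'Unknown action')}"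
--         for opp in (high + medium + low)[:5]
--     ]
-- ===== Notes on version B (the rewrite author's own statement) =====
-- stated objective: alternative
-- what changed: Replaces the priority sort (sorted with a key-lookup comparator) by a single three-bucket pass that appends each opportunity to a high/medium/low list and concatenates them, preserving the stable within-priority order; not measurably faster since formatting dominates.
import Mathlib
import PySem

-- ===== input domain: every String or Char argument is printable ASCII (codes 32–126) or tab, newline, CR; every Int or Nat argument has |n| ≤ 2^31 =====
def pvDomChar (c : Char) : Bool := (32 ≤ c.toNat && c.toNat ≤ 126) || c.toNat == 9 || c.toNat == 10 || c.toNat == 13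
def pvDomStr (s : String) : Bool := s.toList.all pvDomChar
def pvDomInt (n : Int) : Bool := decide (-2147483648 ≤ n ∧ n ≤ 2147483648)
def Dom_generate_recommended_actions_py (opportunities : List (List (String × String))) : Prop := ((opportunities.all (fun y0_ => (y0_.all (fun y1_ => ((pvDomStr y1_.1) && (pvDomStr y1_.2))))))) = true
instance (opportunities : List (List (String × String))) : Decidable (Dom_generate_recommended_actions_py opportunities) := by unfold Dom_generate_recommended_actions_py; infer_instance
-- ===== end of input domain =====

-- B distributes opportunities into three priority buckets in one pass and concatenates them instead of
-- sorting with a key-lookup comparator; the formatting of the top-5 entries is unchanged.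

-- ===== PORT A =====
-- opp.get(k, d) on an association-list dict (first match)
def pvGet (opp : List (String × String)) (k d : String) : String :=
  (PySem.Dict.mk opp).getD k d

-- priority_order.get(x.get("priority", "low"), 1)
def pvPrioKey (opp : List (String × String)) : Int :=
  (PySem.Dict.ofList [("high", (3 : Int)), ("medium", 2), ("low", 1)]).getD (pvGet opp "priority" "low") 1

-- f"[{opp.get('priority', 'medium').upper()}] {opp.get('description', 'Unknown action')}"
def pvFmt (opp : List (String × String)) : String :=
  "[" ++ PySem.Str.upper (pvGet opp "priority" "medium") ++ "] " ++ pvGet opp "description" "Unknown action"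

def generate_recommended_actions_py (opportunities : List (List (String × String))) : List String :=
  let sorted_opportunities := PySem.List.sorted opportunities pvPrioKey true
  (PySem.List.slice sorted_opportunities none (some 5)).foldl (fun actions opp => actions ++ [pvFmt opp]) []

-- ===== PORT B =====
def generate_recommended_actions_py_alt (opportunities : List (List (String × String))) : List String :=
  let b := opportunities.foldl
    (fun (acc : List (List (String × String)) × List (List (String × String)) × List (List (String × String))) opp =>
      let p := (PySem.Dict.mk opp).get? "priority"
      if p = some "high" then (acc.1 ++ [opp], acc.2.1, acc.2.2)
      else if p = some "medium" then (acc.1, acc.2.1 ++ [opp], acc.2.2)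
      else (acc.1, acc.2.1, acc.2.2 ++ [opp]))
    ([], [], [])
  ((b.1 ++ b.2.1 ++ b.2.2).take 5).map pvFmt

-- ===== PRECONDITION & SPEC =====
def Spec_generate_recommended_actions_py (opportunities : List (List (String × String))) (out : List String) : Prop := out = generate_recommended_actions_py_alt opportunities
instance (opportunities : List (List (String × String))) (out : List String) : Decidable (Spec_generate_recommended_actions_py opportunities out) := by unfold Spec_generate_recommended_actions_py; infer_instance

-- ===== CLAIM (what is proved, stated in full; the proofs are below) =====
def Claim_equal_generate_recommended_actions_py : Prop := ∀ (opportunities : List (List (String × String))), Dom_generate_recommended_actions_py opportunities → Spec_generate_recommended_actions_py opportunities (generate_recommended_actions_py opportunities)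

-- ===== LEMMAS AND PROOFS =====

-- closed form of the priority_order lookup
theorem pvPrioVal_eq (p : String) :
    (PySem.Dict.ofList [("high", (3 : Int)), ("medium", 2), ("low", 1)]).getD p 1
      = if p = "high" then 3 else if p = "medium" then 2 else 1 := by
  have h : PySem.Dict.ofList [("high", (3 : Int)), ("medium", 2), ("low", 1)]
      = PySem.Dict.mk [("high", 3), ("medium", 2), ("low", 1)] := by decide
  rw [h]
  simp only [PySem.Dict.getD, PySem.Dict.get?_mk_cons]
  by_cases h1 : p = "high"
  · simp [h1]
  · by_cases h2 : p = "medium"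
    · simp [h2]
    · by_cases h3 : p = "low"
      · simp [h3]
      · simp [Ne.symm h1, Ne.symm h2, Ne.symm h3, h1, h2, PySem.Dict.get?]

theorem pvPrioKey_spec (opp : List (String × String)) :
    pvPrioKey opp
      = if (PySem.Dict.mk opp).get? "priority" = some "high" then 3
        else if (PySem.Dict.mk opp).get? "priority" = some "medium" then 2 else 1 := by
  unfold pvPrioKey pvGet
  rw [pvPrioVal_eq]
  rcases hp : (PySem.Dict.mk opp).get? "priority" with _ | s
  · simp [PySem.Dict.getD, hp]
  · simp [PySem.Dict.getD, hp]

theorem pvPrioKey_cases (opp : List (String × String)) :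
    pvPrioKey opp = 3 ∨ pvPrioKey opp = 2 ∨ pvPrioKey opp = 1 := by
  rw [pvPrioKey_spec]; split_ifs <;> simp

-- x slides left past every element it is strictly "before"
theorem insertBy_cons_of_forall_before {α : Type} (before : α → α → Bool) (x : α) (ys : List α)
    (h : ∀ y ∈ ys, before x y = true) : PySem.List.insertBy before x ys = x :: ys := by
  cases ys with
  | nil => rfl
  | cons y ys => simp [PySem.List.insertBy, h y (by simp)]

-- x passes over a block it is not "before"
theorem insertBy_append_of_forall_not_before {α : Type} (before : α → α → Bool) (x : α)
    (h t : List α) (hh : ∀ y ∈ h, before x y = false) :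
    PySem.List.insertBy before x (h ++ t) = h ++ PySem.List.insertBy before x t := by
  induction h with
  | nil => rfl
  | cons y ys ih =>
      simp only [List.cons_append, PySem.List.insertBy, hh y (by simp)]
      simp only [ih (fun z hz => hh z (by simp [hz])), Bool.false_eq_true, if_false]

-- the sort loop keeps the three priority blocks: invariant of A's insertion sort
theorem sortLoop_buckets (xs : List (List (String × String)))
    (h m l : List (List (String × String)))
    (hh : ∀ y ∈ h, pvPrioKey y = 3) (hm : ∀ y ∈ m, pvPrioKey y = 2) (hl : ∀ y ∈ l, pvPrioKey y = 1) :
    xs.foldl (fun acc x => PySem.List.insertBy (fun a b => decide (pvPrioKey b < pvPrioKey a)) x acc) (h ++ (m ++ l))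
      = (h ++ xs.filter (fun x => pvPrioKey x == 3))
        ++ ((m ++ xs.filter (fun x => pvPrioKey x == 2)) ++ (l ++ xs.filter (fun x => pvPrioKey x == 1))) := by
  induction xs generalizing h m l with
  | nil => simp
  | cons x xs ih =>
      simp only [List.foldl_cons, List.filter_cons]
      rcases pvPrioKey_cases x with hx | hx | hx
      · have step : PySem.List.insertBy (fun a b => decide (pvPrioKey b < pvPrioKey a)) x (h ++ (m ++ l))
            = (h ++ [x]) ++ (m ++ l) := by
          rw [insertBy_append_of_forall_not_before _ _ h (m ++ l)
              (fun y hy => by simp [hh y hy, hx]),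
              insertBy_cons_of_forall_before _ _ (m ++ l)
              (fun y hy => by
                rcases List.mem_append.mp hy with h' | h'
                · simp [hm y h', hx]
                · simp [hl y h', hx])]
          simp
        rw [step, ih (h ++ [x]) m l
            (fun y hy => by rcases List.mem_append.mp hy with h' | h' <;> simp_all) hm hl]
        simp [hx]
      · have step : PySem.List.insertBy (fun a b => decide (pvPrioKey b < pvPrioKey a)) x (h ++ (m ++ l))
            = h ++ ((m ++ [x]) ++ l) := by
          rw [insertBy_append_of_forall_not_before _ _ h (m ++ l)
              (fun y hy => by simp [hh y hy, hx])]
          rw [insertBy_append_of_forall_not_before _ _ m l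
              (fun y hy => by simp [hm y hy, hx]),
              insertBy_cons_of_forall_before _ _ l
              (fun y hy => by simp [hl y hy, hx])]
          simp
        rw [step, ih h (m ++ [x]) l hh
            (fun y hy => by rcases List.mem_append.mp hy with h' | h' <;> simp_all) hl]
        simp [hx]
      · have step : PySem.List.insertBy (fun a b => decide (pvPrioKey b < pvPrioKey a)) x (h ++ (m ++ l))
            = h ++ (m ++ (l ++ [x])) := by
          rw [insertBy_append_of_forall_not_before _ _ h (m ++ l)
              (fun y hy => by simp [hh y hy, hx])]
          rw [insertBy_append_of_forall_not_before _ _ m l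
              (fun y hy => by simp [hm y hy, hx]),
              PySem.List.insertBy_of_forall_not_before _ _ l
              (fun y hy => by simp [hl y hy, hx])]
        rw [step, ih h m (l ++ [x]) hh hm
            (fun y hy => by rcases List.mem_append.mp hy with h' | h' <;> simp_all)]
        simp [hx]

-- A's reverse-sorted list is exactly the three stable buckets
theorem sorted_eq_buckets (xs : List (List (String × String))) :
    PySem.List.sorted xs pvPrioKey true
      = xs.filter (fun x => pvPrioKey x == 3)
        ++ (xs.filter (fun x => pvPrioKey x == 2) ++ xs.filter (fun x => pvPrioKey x == 1)) := by
  rw [PySem.List.sorted_rev_eq_foldl_insertBy]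
  simpa using sortLoop_buckets xs [] [] [] (by simp) (by simp) (by simp)

-- B's bucket loop computes the three priority filters
theorem bucketLoop_filters (xs : List (List (String × String)))
    (h m l : List (List (String × String))) :
    xs.foldl
      (fun (acc : List (List (String × String)) × List (List (String × String)) × List (List (String × String))) opp =>
        let p := (PySem.Dict.mk opp).get? "priority"
        if p = some "high" then (acc.1 ++ [opp], acc.2.1, acc.2.2)
        else if p = some "medium" then (acc.1, acc.2.1 ++ [opp], acc.2.2)
        else (acc.1, acc.2.1, acc.2.2 ++ [opp]))
      (h, m, l)
      = (h ++ xs.filter (fun x => (PySem.Dict.mk x).get? "priority" == some "high"),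
         m ++ xs.filter (fun x => ¬ (PySem.Dict.mk x).get? "priority" == some "high" ∧ (PySem.Dict.mk x).get? "priority" == some "medium"),
         l ++ xs.filter (fun x => ¬ (PySem.Dict.mk x).get? "priority" == some "high" ∧ ¬ (PySem.Dict.mk x).get? "priority" == some "medium")) := by
  induction xs generalizing h m l with
  | nil => simp
  | cons x xs ih =>
      simp only [List.foldl_cons, List.filter_cons]
      by_cases h1 : (PySem.Dict.mk x).get? "priority" = some "high"
      · simp [h1, ih]
      · by_cases h2 : (PySem.Dict.mk x).get? "priority" = some "medium"
        · simp [h2, ih]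
        · simp [h1, h2, ih]

-- key = 3 / 2 / 1 matches B's branch conditions
theorem filter3_eq (xs : List (List (String × String))) :
    xs.filter (fun x => pvPrioKey x == 3)
      = xs.filter (fun x => (PySem.Dict.mk x).get? "priority" == some "high") := by
  apply List.filter_congr
  intro x _
  rw [pvPrioKey_spec]
  split_ifs with h1 h2 <;> simp_all

theorem filter2_eq (xs : List (List (String × String))) :
    xs.filter (fun x => pvPrioKey x == 2)
      = xs.filter (fun x => ¬ (PySem.Dict.mk x).get? "priority" == some "high" ∧ (PySem.Dict.mk x).get? "priority" == some "medium") := by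
  apply List.filter_congr
  intro x _
  rw [pvPrioKey_spec]
  split_ifs with h1 h2 <;> simp_all

theorem filter1_eq (xs : List (List (String × String))) :
    xs.filter (fun x => pvPrioKey x == 1)
      = xs.filter (fun x => ¬ (PySem.Dict.mk x).get? "priority" == some "high" ∧ ¬ (PySem.Dict.mk x).get? "priority" == some "medium") := by
  apply List.filter_congr
  intro x _
  rw [pvPrioKey_spec]
  split_ifs with h1 h2 <;> simp_all

-- ===== VERDICT (by name: the statement is the Claim_ definition above) =====
theorem generate_recommended_actions_py_spec : Claim_equal_generate_recommended_actions_py := by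
  intro opportunities _
  unfold Spec_generate_recommended_actions_py generate_recommended_actions_py generate_recommended_actions_py_alt
  rw [bucketLoop_filters opportunities [] [] []]
  simp only [List.nil_append]
  rw [sorted_eq_buckets, filter3_eq, filter2_eq, filter1_eq]
  rw [PySem.List.foldl_append_singleton_eq_map]
  simp [pysem, List.map_take, beq_iff_eq]
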